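-- pv_equiv track=rewrite | github.com/AleksandrDrubetskoy/hilel_2025 | lesson_06/homework_06_04.py | sum_doubles
-- ===== SOURCE A (Python) =====
-- def sum_doubles (list_with_doubles_val):
--     total_sum = 0
--     list_unique_values = []
--     for i in list_with_doubles_val:
--         if i not in list_unique_values:
--             amount_i = list_with_doubles_val.count(i)
--             if amount_i > 1:
--                 total_sum += i * amount_i
--             list_unique_values.append(i)
--     return total_sum
-- ===== SOURCE B (Python) =====
-- def sum_doubles(list_with_doubles_val):
--     counts = {}
--     for i in list_with_doubles_val:
--         counts[i] = counts.get(i, 0) + 1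
--     total_sum = 0
--     for v, c in counts.items():
--         if c > 1:
--             total_sum += v * c
--     return total_sum
-- ===== Notes on version B (the rewrite author's own statement) =====
-- stated objective: faster
-- what changed: B builds a dict of counts in one pass and sums v*c over its items, replacing A's per-element list membership test and full-list count() scans.
import Mathlib
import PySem

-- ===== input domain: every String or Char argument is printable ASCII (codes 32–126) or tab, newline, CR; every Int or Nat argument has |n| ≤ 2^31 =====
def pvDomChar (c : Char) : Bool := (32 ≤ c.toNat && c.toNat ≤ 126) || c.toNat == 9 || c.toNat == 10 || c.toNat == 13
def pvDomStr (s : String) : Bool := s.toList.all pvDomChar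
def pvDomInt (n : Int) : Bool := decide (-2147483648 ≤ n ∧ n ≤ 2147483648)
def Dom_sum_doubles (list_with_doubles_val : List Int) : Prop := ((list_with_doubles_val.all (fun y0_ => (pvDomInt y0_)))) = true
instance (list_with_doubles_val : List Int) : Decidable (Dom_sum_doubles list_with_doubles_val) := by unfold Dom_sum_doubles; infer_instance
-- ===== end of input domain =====

-- B replaces A's quadratic membership/count() scans by a one-pass dict of counts, then sums v*c over its items.

-- ===== PORT A =====
def sum_doubles (list_with_doubles_val : List Int) : Int :=
  (list_with_doubles_val.foldl
    (fun (st : Int × List Int) i =>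
      if i ∈ st.2 then st
      else
        let amount_i : Int := (PySem.List.count list_with_doubles_val i : Int)
        (if amount_i > 1 then st.1 + i * amount_i else st.1, st.2 ++ [i]))
    (0, [])).1

-- ===== PORT B =====
def sum_doubles_alt (list_with_doubles_val : List Int) : Int :=
  let counts := list_with_doubles_val.foldl
    (fun (d : PySem.Dict Int Int) i => d.insert i (d.getD i 0 + 1)) PySem.Dict.empty
  counts.items.foldl (fun acc p => if p.2 > 1 then acc + p.1 * p.2 else acc) 0

-- ===== PRECONDITION & SPEC =====
def Spec_sum_doubles (list_with_doubles_val : List Int) (out : Int) : Prop := out = sum_doubles_alt list_with_doubles_val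
instance (list_with_doubles_val : List Int) (out : Int) : Decidable (Spec_sum_doubles list_with_doubles_val out) := by unfold Spec_sum_doubles; infer_instance

-- ===== CLAIM (what is proved, stated in full; the proofs are below) =====
def Claim_equal_sum_doubles : Prop := ∀ (list_with_doubles_val : List Int), Dom_sum_doubles list_with_doubles_val → Spec_sum_doubles list_with_doubles_val (sum_doubles list_with_doubles_val)

-- ===== LEMMAS AND PROOFS =====

-- Set.update keeps its first argument as a prefix.
theorem update_prefix (l u : List Int) : ∃ t, PySem.Set.update u l = u ++ t := by
  induction l generalizing u with
  | nil => exact ⟨[], by simp [PySem.Set.update]⟩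
  | cons i l ih =>
    show ∃ t, PySem.Set.update (PySem.Set.add u i) l = u ++ t
    by_cases h : i ∈ u
    · have : PySem.Set.add u i = u := by simp [PySem.Set.add, PySem.Set.contains, h]
      rw [this]; exact ih u
    · have : PySem.Set.add u i = u ++ [i] := by simp [PySem.Set.add, PySem.Set.contains, h]
      rw [this]
      obtain ⟨t, ht⟩ := ih (u ++ [i])
      exact ⟨[i] ++ t, by simp [ht]⟩

-- A's dedup-guarded fold equals a plain fold over the new elements of Set.update.
theorem fold_dedup (g : Int → Int → Int) (l : List Int) :
    ∀ (u : List Int) (t : Int),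
    (l.foldl (fun (st : Int × List Int) i =>
        if i ∈ st.2 then st else (g st.1 i, st.2 ++ [i])) (t, u)).1
      = ((PySem.Set.update u l).drop u.length).foldl g t := by
  induction l with
  | nil => intro u t; simp [PySem.Set.update]
  | cons i l ih =>
    intro u t
    show (l.foldl _ (if i ∈ u then (t, u) else (g t i, u ++ [i]))).1
      = ((PySem.Set.update (PySem.Set.add u i) l).drop u.length).foldl g t
    by_cases h : i ∈ u
    · have ha : PySem.Set.add u i = u := by simp [PySem.Set.add, PySem.Set.contains, h]
      simp only [h, if_true, ha]
      exact ih u t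
    · have ha : PySem.Set.add u i = u ++ [i] := by simp [PySem.Set.add, PySem.Set.contains, h]
      simp only [h, if_false, ha]
      rw [ih (u ++ [i]) (g t i)]
      obtain ⟨s, hs⟩ := update_prefix l (u ++ [i])
      rw [hs]
      simp [List.append_assoc]

theorem sum_doubles_eq_fold (xs : List Int) :
    sum_doubles xs
      = (PySem.Set.ofList xs).foldl
          (fun acc i => if ((xs.count i : Int)) > 1 then acc + i * (xs.count i : Int) else acc) 0 := by
  unfold sum_doubles
  have := fold_dedup
    (fun acc i => if ((xs.count i : Int)) > 1 then acc + i * (xs.count i : Int) else acc) xs [] 0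
  simp only [List.length_nil, List.drop_zero] at this
  have h2 : PySem.Set.update ([] : List Int) xs = PySem.Set.ofList xs := by
    simp [PySem.Set.update, PySem.Set.ofList_eq_foldl]
  rw [h2] at this
  have h3 : (fun (st : Int × List Int) i =>
      if i ∈ st.2 then st
      else (if ((xs.count i : Int)) > 1 then st.1 + i * (xs.count i : Int) else st.1, st.2 ++ [i]))
    = (fun (st : Int × List Int) i =>
      if i ∈ st.2 then st
      else
        let amount_i : Int := (PySem.List.count xs i : Int)
        (if amount_i > 1 then st.1 + i * amount_i else st.1, st.2 ++ [i])) := by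
    funext st i
    by_cases h : i ∈ st.2 <;> simp [h, PySem.List.count_eq]
  rw [h3] at this
  exact this

theorem sum_doubles_alt_eq_fold (xs : List Int) :
    sum_doubles_alt xs
      = (PySem.Set.ofList xs).foldl
          (fun acc i => if ((xs.count i : Int)) > 1 then acc + i * (xs.count i : Int) else acc) 0 := by
  show (PySem.Dict.items (xs.foldl
      (fun (d : PySem.Dict Int Int) i => d.insert i (d.getD i 0 + 1)) PySem.Dict.empty)).foldl
      (fun acc p => if p.2 > 1 then acc + p.1 * p.2 else acc) 0 = _
  rw [PySem.Dict.foldl_insert_getD_add_one_eq_counter, PySem.Dict.items_counter, List.foldl_map]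

-- ===== VERDICT (by name: the statement is the Claim_ definition above) =====
theorem sum_doubles_spec : Claim_equal_sum_doubles := by
  intro xs _
  unfold Spec_sum_doubles
  rw [sum_doubles_eq_fold, sum_doubles_alt_eq_fold]
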